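-- pv_equiv track=rewrite | github.com/aynats/naruto | generator.py | make_hexagon_grid
-- ===== SOURCE A (Python) =====
-- def make_hexagon_grid(h):
--     tabl = []
--     if h % 2 == 0:
--         for i in range(2, h + 1, 2):
--             tabl.append(i * [0])
--         for i in range(h // 2, 0, -1):
--             tabl.append((i * 2) * [0])
--     else:
--         for i in range(1, h + 1, 2):
--             tabl.append(i * [0])
--         for i in range(h - 2, 0, -2):
--             tabl.append(i * [0])
--     return tabl
-- ===== SOURCE B (Python) =====
-- def make_hexagon_grid(h):
--     # single pass: row i's width is given by the closed form h + 1 - h % 2 - |2*i + 1 - h|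
--     return [(h + 1 - h % 2 - abs(2 * i + 1 - h)) * [0] for i in range(h)]
-- ===== Notes on version B (the rewrite author's own statement) =====
-- stated objective: simpler
-- what changed: B makes a single pass over the h row indices and computes each row's width by the closed form h + 1 - h%2 - |2*i + 1 - h|, instead of A's two separately constructed ascending/descending range loops.
import Mathlib
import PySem

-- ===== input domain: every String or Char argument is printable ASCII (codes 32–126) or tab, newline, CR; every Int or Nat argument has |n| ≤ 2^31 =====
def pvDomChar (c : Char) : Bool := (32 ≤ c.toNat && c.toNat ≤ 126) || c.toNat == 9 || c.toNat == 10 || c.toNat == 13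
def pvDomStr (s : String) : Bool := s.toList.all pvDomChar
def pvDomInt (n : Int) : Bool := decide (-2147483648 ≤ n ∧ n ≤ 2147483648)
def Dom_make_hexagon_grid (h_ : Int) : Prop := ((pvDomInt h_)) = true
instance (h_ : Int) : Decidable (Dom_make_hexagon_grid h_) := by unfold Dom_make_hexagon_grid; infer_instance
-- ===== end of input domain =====

-- B replaces A's two staged half-building loops by one pass over the h row indices with a
-- closed-form width per row (objective: simpler, same cost).

-- ===== PORT A =====
-- two append-loops over ranges; 'i * [0]' is List.replicate i.toNat (exact: Python n*[0] is [] for n ≤ 0)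
def make_hexagon_grid (h_ : Int) : List (List Int) :=
  if PySem.Int.mod h_ 2 = 0 then
    ((PySem.List.pyRange 2 (h_ + 1) 2).map (fun i => List.replicate i.toNat (0 : Int))) ++
    ((PySem.List.pyRange (PySem.Int.floordiv h_ 2) 0 (-1)).map (fun i => List.replicate (i * 2).toNat (0 : Int)))
  else
    ((PySem.List.pyRange 1 (h_ + 1) 2).map (fun i => List.replicate i.toNat (0 : Int))) ++
    ((PySem.List.pyRange (h_ - 2) 0 (-2)).map (fun i => List.replicate i.toNat (0 : Int)))

-- ===== PORT B =====
-- one comprehension over range(h); width(i) = h + 1 - h % 2 - |2*i + 1 - h|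
def make_hexagon_grid_alt (h_ : Int) : List (List Int) :=
  (PySem.List.pyRange 0 h_ 1).map
    (fun i => List.replicate (h_ + 1 - PySem.Int.mod h_ 2 - |2 * i + 1 - h_|).toNat (0 : Int))

-- ===== PRECONDITION & SPEC =====
def Spec_make_hexagon_grid (h_ : Int) (out : List (List Int)) : Prop := out = make_hexagon_grid_alt h_
instance (h_ : Int) (out : List (List Int)) : Decidable (Spec_make_hexagon_grid h_ out) := by unfold Spec_make_hexagon_grid; infer_instance

-- ===== CLAIM (what is proved, stated in full; the proofs are below) =====
def Claim_equal_make_hexagon_grid : Prop := ∀ (h_ : Int), Dom_make_hexagon_grid h_ → Spec_make_hexagon_grid h_ (make_hexagon_grid h_)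

-- ===== LEMMAS AND PROOFS =====

theorem pyRange_neg_two_zero (a : Int) :
    PySem.List.pyRange a 0 (-2) =
      (List.range (if (0:Int) < a then ((a - 0 + -(-2) - 1) / -(-2)).toNat else 0)).map
        (fun (k : Nat) => a + (-2) * (k : Int)) := by
  simp only [PySem.List.pyRange]
  rw [if_neg (by norm_num), if_neg (by norm_num)]

theorem hex_even (h : Int) (he : h % 2 = 0) :
    make_hexagon_grid h = make_hexagon_grid_alt h := by
  have hm : PySem.Int.mod h 2 = h % 2 := by simp [PySem.Int.mod, Int.fmod_eq_emod]
  have hfd : PySem.Int.floordiv h 2 = h / 2 := by simp [PySem.Int.floordiv, Int.fdiv_eq_ediv]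
  unfold make_hexagon_grid make_hexagon_grid_alt
  rw [hm, he, if_pos rfl, hfd, PySem.List.pyRange_neg_one,
    PySem.List.pyRange_of_pos 2 (h + 1) (by norm_num), PySem.List.pyRange_one]
  have hc1 : (if (2 : Int) < h + 1 then ((h + 1 - 2 + 2 - 1) / 2).toNat else 0) = (h / 2).toNat := by
    split_ifs with hlt <;> omega
  rw [hc1]
  apply List.ext_getElem
  · simp; omega
  · intro j hj1 hj2
    simp only [List.length_append, List.length_map, List.length_range] at hj1 hj2 ⊢
    rw [List.getElem_append]
    split_ifs with hsplit <;>
      simp only [List.getElem_map, List.getElem_range, List.length_map, List.length_range] <;>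
      · congr 1
        rw [Int.abs_eq_natAbs]
        simp only [List.length_map, List.length_range] at hsplit
        omega

theorem hex_odd (h : Int) (ho : h % 2 = 1) :
    make_hexagon_grid h = make_hexagon_grid_alt h := by
  have hm : PySem.Int.mod h 2 = h % 2 := by simp [PySem.Int.mod, Int.fmod_eq_emod]
  unfold make_hexagon_grid make_hexagon_grid_alt
  rw [hm, ho, if_neg (by norm_num), pyRange_neg_two_zero,
    PySem.List.pyRange_of_pos 1 (h + 1) (by norm_num), PySem.List.pyRange_one]
  have hc1 : (if (1 : Int) < h + 1 then ((h + 1 - 1 + 2 - 1) / 2).toNat else 0) = ((h + 1) / 2).toNat := by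
    split_ifs <;> omega
  have hc2 : (if (0:Int) < h - 2 then ((h - 2 - 0 + -(-2) - 1) / -(-2)).toNat else 0)
      = ((h - 1) / 2).toNat := by
    have hq : (h - 2 - 0 + -(-2) - 1) / -(-2) = (h - 1) / 2 := by norm_num
    rw [hq]; split_ifs <;> omega
  rw [hc1, hc2]
  apply List.ext_getElem
  · simp; omega
  · intro j hj1 hj2
    simp only [List.length_append, List.length_map, List.length_range] at hj1 hj2 ⊢
    rw [List.getElem_append]
    split_ifs with hsplit <;>
      simp only [List.getElem_map, List.getElem_range, List.length_map, List.length_range] <;>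
      · congr 1
        rw [Int.abs_eq_natAbs]
        simp only [List.length_map, List.length_range] at hsplit
        omega

-- ===== VERDICT (by name: the statement is the Claim_ definition above) =====
theorem make_hexagon_grid_spec : Claim_equal_make_hexagon_grid := by
  intro h _
  unfold Spec_make_hexagon_grid
  rcases Int.emod_two_eq h with he | ho
  · exact hex_even h he
  · exact hex_odd h ho
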